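-- pv_equiv track=rewrite | github.com/Sh-Pe/cs-tau-shpe | src/extended-intro-to-computer-science/hw/cshw1/Code/hw1_334558962.py | format_str
-- ===== SOURCE A (Python) =====
-- def format_str(text_to_format: str, st_to_insert: str) -> str:
--     output: str = ""
--
--     for char in text_to_format:
--         if char == "?":
--             output += st_to_insert
--         else:
--             output += char
--
--     return output
-- ===== SOURCE B (Python) =====
-- def format_str(text_to_format: str, st_to_insert: str) -> str:
--     return st_to_insert.join(text_to_format.split("?"))
-- ===== Notes on version B (the rewrite author's own statement) =====
-- stated objective: idiomatic
-- what changed: Replaces the per-character accumulation loop (branching on each char and re-appending to a growing string) with a segment decomposition: split the text on '?' and join the segments with the insertion string, done in C by str.split/str.join.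
import Mathlib
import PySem

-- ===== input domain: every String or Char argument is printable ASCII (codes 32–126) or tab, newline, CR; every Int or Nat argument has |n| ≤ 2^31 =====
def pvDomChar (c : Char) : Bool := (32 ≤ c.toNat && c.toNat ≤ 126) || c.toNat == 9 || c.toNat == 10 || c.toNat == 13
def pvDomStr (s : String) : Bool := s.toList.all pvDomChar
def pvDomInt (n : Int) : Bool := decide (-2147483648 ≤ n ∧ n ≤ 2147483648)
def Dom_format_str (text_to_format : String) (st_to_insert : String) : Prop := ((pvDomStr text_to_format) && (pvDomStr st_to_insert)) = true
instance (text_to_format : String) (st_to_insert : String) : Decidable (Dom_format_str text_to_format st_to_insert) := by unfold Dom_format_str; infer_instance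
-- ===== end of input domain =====

-- B replaces A's per-character branch-and-append loop with split-on-'?' + join (idiomatic decomposition; same result).

-- ===== PORT A =====
-- loop over the characters, appending st_to_insert or the char itself
def format_str (text_to_format : String) (st_to_insert : String) : String :=
  String.mk (text_to_format.toList.foldl
    (fun output char => if char == '?' then output ++ st_to_insert.toList else output ++ [char]) [])

-- ===== PORT B =====
-- st_to_insert.join(text_to_format.split("?")) — split/join on the char level (PySem.Chars is exact)
def format_str_alt (text_to_format : String) (st_to_insert : String) : String :=
  String.mk (PySem.Chars.join st_to_insert.toList
    (PySem.Chars.splitOn text_to_format.toList "?".toList))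

-- ===== PRECONDITION & SPEC =====
def Spec_format_str (text_to_format : String) (st_to_insert : String) (out : String) : Prop := out = format_str_alt text_to_format st_to_insert
instance (text_to_format : String) (st_to_insert : String) (out : String) : Decidable (Spec_format_str text_to_format st_to_insert out) := by unfold Spec_format_str; infer_instance

-- ===== CLAIM (what is proved, stated in full; the proofs are below) =====
def Claim_equal_format_str : Prop := ∀ (text_to_format : String) (st_to_insert : String), Dom_format_str text_to_format st_to_insert → Spec_format_str text_to_format st_to_insert (format_str text_to_format st_to_insert)

-- ===== LEMMAS AND PROOFS =====

-- join over a nonempty list unfolds one cons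
theorem pv_join_cons (ins x : List Char) (xs : List (List Char)) (y : List Char) :
    PySem.Chars.join ins (x :: (xs ++ [y])) = x ++ (ins ++ PySem.Chars.join ins (xs ++ [y])) := by
  cases xs with
  | nil => simp [PySem.Chars.join_cons_cons]
  | cons w ws => simp [PySem.Chars.join_cons_cons]

-- joining with an extra suffix glued to the last part
theorem pv_join_last (ins : List Char) (xs : List (List Char)) (y z : List Char) :
    PySem.Chars.join ins (xs ++ [y ++ z]) = PySem.Chars.join ins (xs ++ [y]) ++ z := by
  induction xs with
  | nil => simp [PySem.Chars.join_singleton]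
  | cons x xs ih => simp [pv_join_cons, ih]

-- joining with an extra empty part appended at the end
theorem pv_join_snoc_nil (ins : List Char) (xs : List (List Char)) (y : List Char) :
    PySem.Chars.join ins ((xs ++ [y]) ++ [[]]) = PySem.Chars.join ins (xs ++ [y]) ++ ins := by
  induction xs with
  | nil => simp [PySem.Chars.join_cons_cons, PySem.Chars.join_singleton]
  | cons x xs ih =>
    have h1 := pv_join_cons ins x (xs ++ [y]) ([] : List Char)
    simp only [List.append_assoc, List.nil_append, List.cons_append] at h1 ih ⊢
    rw [h1, ih, pv_join_cons ins x xs y]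
    simp

-- main invariant over splitOn's worker for the single-char separator '?'
theorem pv_go (ins : List Char) :
    ∀ fuel (l cur acc : _), l.length ≤ fuel →
    PySem.Chars.join ins (PySem.Chars.splitOn.go ['?'] fuel l cur acc)
      = PySem.Chars.join ins (acc.reverse ++ [cur.reverse])
          ++ l.flatMap (fun c => if c == '?' then ins else [c]) := by
  intro fuel
  induction fuel with
  | zero =>
    intro l cur acc h
    have hl : l = [] := List.length_eq_zero_iff.mp (Nat.le_zero.mp h)
    subst hl
    simp [PySem.Chars.splitOn.go]
  | succ fuel ih =>
    intro l cur acc h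
    cases l with
    | nil => simp [PySem.Chars.splitOn.go]
    | cons c rest =>
      by_cases hc : c = '?'
      · subst hc
        have hpre : List.isPrefixOf ['?'] ('?' :: rest) = true := by
          simp [List.isPrefixOf]
        rw [show PySem.Chars.splitOn.go ['?'] (fuel + 1) ('?' :: rest) cur acc
              = PySem.Chars.splitOn.go ['?'] fuel (List.drop (['?'] : List Char).length ('?' :: rest)) [] (cur.reverse :: acc) by
          simp [PySem.Chars.splitOn.go, hpre]]
        have hlen : rest.length ≤ fuel := by simpa using Nat.lt_succ_iff.mp (by simpa using h)
        rw [show List.drop (['?'] : List Char).length ('?' :: rest) = rest by simp]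
        rw [ih rest [] (cur.reverse :: acc) hlen]
        have : (cur.reverse :: acc).reverse ++ [([] : List Char).reverse]
             = (acc.reverse ++ [cur.reverse]) ++ [[]] := by simp
        rw [this, pv_join_snoc_nil]
        simp
      · have hpre : List.isPrefixOf ['?'] (c :: rest) = false := by
          simp only [List.isPrefixOf, Bool.and_eq_false_iff, beq_eq_false_iff_ne, ne_eq]
          exact Or.inl fun h => hc h.symm
        rw [show PySem.Chars.splitOn.go ['?'] (fuel + 1) (c :: rest) cur acc
              = PySem.Chars.splitOn.go ['?'] fuel rest (c :: cur) acc by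
          simp [PySem.Chars.splitOn.go, hpre]]
        have hlen : rest.length ≤ fuel := by simpa using Nat.lt_succ_iff.mp (by simpa using h)
        rw [ih rest (c :: cur) acc hlen]
        have : (c :: cur).reverse = cur.reverse ++ [c] := by simp
        rw [this, pv_join_last]
        simp [hc]

-- ===== VERDICT (by name: the statement is the Claim_ definition above) =====
theorem format_str_spec : Claim_equal_format_str := by
  intro t s _
  unfold Spec_format_str format_str format_str_alt
  have hf : (fun (output : List Char) (char : Char) => if char == '?' then output ++ s.toList else output ++ [char])
      = (fun acc char => acc ++ if char == '?' then s.toList else [char]) := by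
    funext o c; by_cases h : c = '?' <;> simp [h]
  rw [hf, PySem.List.foldl_append_eq_flatMap (fun char => if char == '?' then s.toList else [char]) t.toList []]
  unfold PySem.Chars.splitOn
  rw [show "?".toList = ['?'] by decide]
  rw [pv_go s.toList (t.toList.length + 1) t.toList [] [] (by omega)]
  simp [PySem.Chars.join_singleton]
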